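-- pv_equiv track=rewrite | github.com/znak13/XBRL_SCHA_Prirost | module/adjustments.py | find_nomber
-- ===== SOURCE A (Python) =====
-- def find_nomber(txt, n='№'):
--     """Поиск в строке фрагмента '№'(номер договора)"""
--     # № - элемент, с которого начинается искомый fragment
--     stop = False
--     fragment = None
--     txt_list = txt.split()
--     for i, word in enumerate(txt_list):
--         if word.startswith(n):
--             # состоит только из '№'
--             if len(txt_list[i]) == 1:
--                 fragment = n + txt_list[i + 1]
--                 stop = True
--                 break
--             else:
--                 fragment = txt_list[i]
--                 stop = True
--                 break
--     # если во всех словах не найден "№"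
--     if not stop:
--         for i, word in enumerate(txt_list):
--             # слово состоит не только из букв
--             # или не заканчивается на точку
--             # или не является датой
--             if not word.isalpha() and \
--                     not word.endswith('.') and \
--                     len(word.split('.')) < 3:
--                 fragment = n + txt_list[i]
--                 break
--
--     return fragment
-- ===== SOURCE B (Python) =====
-- def find_nomber(txt, n='№'):
--     """Single pass: return at the first word starting with n; remember the first
--     fallback word and use it only if the loop finds no n-word."""
--     txt_list = txt.split()
--     fallback = None
--     for i, word in enumerate(txt_list):
--         if word.startswith(n):
--             return n + txt_list[i + 1] if len(word) == 1 else word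
--         if fallback is None and not word.isalpha() \
--                 and not word.endswith('.') and len(word.split('.')) < 3:
--             fallback = word
--     return n + fallback if fallback is not None else None
-- ===== Notes on version B (the rewrite author's own statement) =====
-- stated objective: simpler
-- what changed: Replaced A's two sequential scans (first for an n-prefixed word, then a full rescan for a fallback word) by a single pass that returns at the first n-prefixed word and remembers only the first fallback candidate for use after the loop.
import Mathlib
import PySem

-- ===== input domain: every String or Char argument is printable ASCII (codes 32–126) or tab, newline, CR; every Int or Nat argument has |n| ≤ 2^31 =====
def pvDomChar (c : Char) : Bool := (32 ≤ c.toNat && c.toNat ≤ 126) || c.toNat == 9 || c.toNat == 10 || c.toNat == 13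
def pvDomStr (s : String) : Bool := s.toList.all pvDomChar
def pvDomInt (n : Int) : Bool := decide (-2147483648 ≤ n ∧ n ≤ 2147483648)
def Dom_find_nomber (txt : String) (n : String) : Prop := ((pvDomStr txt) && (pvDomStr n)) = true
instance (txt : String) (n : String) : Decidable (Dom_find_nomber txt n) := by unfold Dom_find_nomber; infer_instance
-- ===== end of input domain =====

-- B replaces A's two sequential scans by ONE pass that records the first fallback word and
-- returns immediately at the first n-prefixed word (objective: simpler, one traversal).

-- ===== PORT A =====
-- the fallback test of A's second loop (shared wording of the same Python condition)
def pvCond2 (w : String) : Bool :=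
  !PySem.Str.strIsalpha w && !PySem.Str.endswith w "." &&
    decide ((PySem.Chars.splitOn w.toList ['.']).length < 3)

-- A's first loop: scan for a word starting with n (break = return some)
def pvLoopA1 (n : String) : List String → Option String
  | [] => none
  | w :: ws =>
    if PySem.Str.startswith w n then
      if PySem.Str.len w == 1 then (ws.head?).map (fun nxt => n ++ nxt)  -- head? none = IndexError, outside Pre_
      else some w
    else pvLoopA1 n ws

-- A's second loop
def pvLoopA2 (n : String) : List String → Option String
  | [] => none
  | w :: ws => if pvCond2 w then some (n ++ w) else pvLoopA2 n ws

def find_nomber (txt : String) (n : String) : Option String :=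
  let txt_list := PySem.Str.split₀ txt
  match pvLoopA1 n txt_list with
  | some fragment => some fragment
  | none => pvLoopA2 n txt_list        -- "if not stop"

-- ===== PORT B =====
-- B's single pass with a fallback accumulator
def pvLoopB (n : String) (fb : Option String) : List String → Option String
  | [] => fb.map (fun w => n ++ w)
  | w :: ws =>
    if PySem.Str.startswith w n then
      if PySem.Str.len w == 1 then (ws.head?).map (fun nxt => n ++ nxt)  -- head? none = IndexError, outside Pre_
      else some w
    else pvLoopB n (if fb.isNone && pvCond2 w then some w else fb) ws

def find_nomber_alt (txt : String) (n : String) : Option String :=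
  pvLoopB n none (PySem.Str.split₀ txt)

-- ===== PRECONDITION & SPEC =====
-- Pre_ excludes exactly the inputs on which A raises IndexError: every word before the last does not
-- start with n while the last word starts with n and has length 1 (then A reads txt_list[i+1] past the end).
def Pre_find_nomber (txt : String) (n : String) : Prop :=
  ¬ ((∀ w ∈ (PySem.Str.split₀ txt).dropLast, PySem.Str.startswith w n = false) ∧
     ((PySem.Str.split₀ txt).getLast?.any
        (fun w => PySem.Str.startswith w n && (PySem.Str.len w == 1))) = true)
instance (txt : String) (n : String) : Decidable (Pre_find_nomber txt n) := by
  unfold Pre_find_nomber; infer_instance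

def pvWitness_find_nomber : String × String := ("dog N77 from 1.2.2020", "N")

def Spec_find_nomber (txt : String) (n : String) (out : Option String) : Prop := out = find_nomber_alt txt n
instance (txt : String) (n : String) (out : Option String) : Decidable (Spec_find_nomber txt n out) := by unfold Spec_find_nomber; infer_instance

-- ===== CLAIM (what is proved, stated in full; the proofs are below) =====
def Claim_equal_find_nomber : Prop := ∀ (txt : String) (n : String), Dom_find_nomber txt n → Pre_find_nomber txt n → Spec_find_nomber txt n (find_nomber txt n)

-- ===== LEMMAS AND PROOFS =====

-- crash-freedom of the list, in the recursion-friendly form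
def pvSafe (n : String) : List String → Bool
  | [] => true
  | w :: ws =>
    if PySem.Str.startswith w n then (!(PySem.Str.len w == 1) || !ws.isEmpty)
    else pvSafe n ws

theorem pvSafe_of_pre (n : String) (ws : List String)
    (h : ¬ ((∀ w ∈ ws.dropLast, PySem.Str.startswith w n = false) ∧
            (ws.getLast?.any (fun w => PySem.Str.startswith w n && (PySem.Str.len w == 1))) = true)) :
    pvSafe n ws = true := by
  induction ws with
  | nil => rfl
  | cons w ws ih =>
    simp only [pvSafe]
    by_cases hsw : PySem.Str.startswith w n
    · simp only [hsw, if_true]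
      cases ws with
      | nil =>
        simp at h
        simp [h hsw]
      | cons v vs => simp
    · simp only [hsw]
      apply ih
      intro ⟨h1, h2⟩
      cases ws with
      | nil => simp at h2
      | cons v vs =>
        apply h
        constructor
        · intro u hu
          rcases (by simpa using hu : u = w ∨ u ∈ (v :: vs).dropLast) with rfl | hmem
          · simpa using hsw
          · exact h1 u hmem
        · simpa using h2

-- the one-pass loop equals A's two-loop pipeline, for any fallback accumulator
theorem pvLoopB_eq (n : String) (ws : List String) (hsafe : pvSafe n ws = true) :
    ∀ fb : Option String,
      pvLoopB n fb ws =
        match pvLoopA1 n ws with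
        | some f => some f
        | none => match fb with
                  | some v => some (n ++ v)
                  | none => pvLoopA2 n ws := by
  induction ws with
  | nil => intro fb; cases fb <;> rfl
  | cons w ws ih =>
    intro fb
    simp only [pvLoopB, pvLoopA1, pvLoopA2]
    by_cases hsw : PySem.Str.startswith w n
    · simp only [hsw, if_true]
      by_cases hlen : (PySem.Str.len w == 1) = true
      · simp only [pvSafe, hsw, hlen, if_true] at hsafe
        simp only [hlen, if_true]
        cases ws with
        | nil => simp at hsafe
        | cons v vs => rfl
      · simp only [hlen]; rfl
    · simp only [hsw]
      have hsafe' : pvSafe n ws = true := by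
        simp only [pvSafe, hsw] at hsafe
        simpa using hsafe
      rw [ih hsafe']
      cases hA : pvLoopA1 n ws with
      | some f => rfl
      | none =>
        cases fb with
        | some v => rfl
        | none => by_cases hq : pvCond2 w <;> simp [hq]

-- ===== VERDICT (by name: the statement is the Claim_ definition above) =====
theorem find_nomber_spec : Claim_equal_find_nomber := by
  intro txt n _ hpre
  unfold Spec_find_nomber find_nomber find_nomber_alt
  have hsafe := pvSafe_of_pre n (PySem.Str.split₀ txt) hpre
  rw [pvLoopB_eq n _ hsafe none]
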